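-- pv_equiv track=rewrite | github.com/pc5401/my_BOJ | 백준/Silver/12841. 정보대 등산/정보대 등산.py | solve
-- ===== SOURCE A (Python) =====
-- def solve(n: int, cross: list[int], left: list[int], right: list[int]) -> tuple:
--     leftCum = [0] * (n + 1)
--     for i in range(2, n + 1):
--         leftCum[i] = leftCum[i - 1] + left[i - 2]
--     rightCum = [0] * (n + 2)
--     for i in range(n - 1, 0, -1):
--         rightCum[i] = rightCum[i + 1] + right[i - 1]
--     best_i = 1
--     best_dist = leftCum[1] + cross[0] + rightCum[1]
--     for i in range(2, n + 1):
--         dist = leftCum[i] + cross[i - 1] + rightCum[i]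
--         if dist < best_dist:
--             best_dist = dist
--             best_i = i
--     return best_i, best_dist
-- ===== SOURCE B (Python) =====
-- def solve(n: int, cross: list[int], left: list[int], right: list[int]) -> tuple:
--     # one forward pass: running left prefix + (total right - right prefix); first index wins ties
--     total_right = sum(right[:n - 1])
--     best_i = 1
--     best_dist = cross[0] + total_right
--     left_acc = 0
--     right_pref = 0
--     for i in range(2, n + 1):
--         left_acc += left[i - 2]
--         right_pref += right[i - 2]
--         dist = left_acc + cross[i - 1] + (total_right - right_pref)
--         if dist < best_dist:
--             best_i = i
--             best_dist = dist
--     return best_i, best_dist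
-- ===== Notes on version B (the rewrite author's own statement) =====
-- stated objective: alternative
-- what changed: Replaces A's two preallocated cumulative arrays (a forward leftCum pass, a backward rightCum pass, then a third argmin scan) by a single forward pass that keeps running left-prefix and right-prefix accumulators and uses totalRight - rightPrefix in place of the suffix array.
import Mathlib
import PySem

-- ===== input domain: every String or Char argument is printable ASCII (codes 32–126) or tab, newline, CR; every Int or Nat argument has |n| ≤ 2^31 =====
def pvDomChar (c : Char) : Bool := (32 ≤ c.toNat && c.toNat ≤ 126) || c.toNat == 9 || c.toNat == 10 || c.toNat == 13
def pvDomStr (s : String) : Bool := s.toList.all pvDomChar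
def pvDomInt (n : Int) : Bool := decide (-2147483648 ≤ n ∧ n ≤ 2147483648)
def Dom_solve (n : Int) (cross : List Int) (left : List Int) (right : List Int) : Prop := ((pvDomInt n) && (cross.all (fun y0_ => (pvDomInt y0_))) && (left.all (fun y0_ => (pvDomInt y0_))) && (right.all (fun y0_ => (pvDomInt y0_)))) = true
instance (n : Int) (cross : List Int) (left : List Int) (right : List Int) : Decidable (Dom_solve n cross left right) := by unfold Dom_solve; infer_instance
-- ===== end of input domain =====

-- B replaces A's two cumulative arrays (forward leftCum pass, backward rightCum pass, then a third
-- argmin scan) by a single forward pass with running prefix accumulators; same values, first index wins ties.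

-- ===== PORT A =====
def buildLeftCum (n : Int) (left : List Int) : List Int :=
  (PySem.List.pyRange 2 (n + 1) 1).foldl
    (fun lc i =>
      PySem.List.pySetD lc i (PySem.List.pyGetD lc (i - 1) 0 + PySem.List.pyGetD left (i - 2) 0))
    (List.replicate (n + 1).toNat 0)

def buildRightCum (n : Int) (right : List Int) : List Int :=
  (PySem.List.pyRange (n - 1) 0 (-1)).foldl
    (fun rc i =>
      PySem.List.pySetD rc i (PySem.List.pyGetD rc (i + 1) 0 + PySem.List.pyGetD right (i - 1) 0))
    (List.replicate (n + 2).toNat 0)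

def solve (n : Int) (cross : List Int) (left : List Int) (right : List Int) : Int × Int :=
  let leftCum := buildLeftCum n left
  let rightCum := buildRightCum n right
  (PySem.List.pyRange 2 (n + 1) 1).foldl
    (fun b i =>
      let dist := PySem.List.pyGetD leftCum i 0 + PySem.List.pyGetD cross (i - 1) 0 +
        PySem.List.pyGetD rightCum i 0
      if dist < b.2 then (i, dist) else b)
    (1, PySem.List.pyGetD leftCum 1 0 + PySem.List.pyGetD cross 0 0 + PySem.List.pyGetD rightCum 1 0)

-- ===== PORT B =====
def solve_alt (n : Int) (cross : List Int) (left : List Int) (right : List Int) : Int × Int :=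
  let totalRight := (PySem.List.slice right none (some (n - 1))).sum
  let s := (PySem.List.pyRange 2 (n + 1) 1).foldl
    (fun s i =>
      let la := s.2.2.1 + PySem.List.pyGetD left (i - 2) 0
      let rp := s.2.2.2 + PySem.List.pyGetD right (i - 2) 0
      let dist := la + PySem.List.pyGetD cross (i - 1) 0 + (totalRight - rp)
      if dist < s.2.1 then (i, dist, la, rp) else (s.1, s.2.1, la, rp))
    ((1 : Int), PySem.List.pyGetD cross 0 0 + totalRight, (0 : Int), (0 : Int))
  (s.1, s.2.1)

-- ===== PRECONDITION & SPEC =====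
-- Pre_: A raises IndexError when n < 1 (it reads leftCum[1] and cross[0]) or when cross/left/right
-- are shorter than the n / n-1 entries its loops index; exactly those inputs are excluded.
def Pre_solve (n : Int) (cross : List Int) (left : List Int) (right : List Int) : Prop :=
  1 ≤ n ∧ n ≤ (cross.length : Int) ∧ n - 1 ≤ (left.length : Int) ∧ n - 1 ≤ (right.length : Int)
instance (n : Int) (cross : List Int) (left : List Int) (right : List Int) : Decidable (Pre_solve n cross left right) := by unfold Pre_solve; infer_instance

def pvWitness_solve : Int × List Int × List Int × List Int := (3, [7, 2, 5], [1, 4], [3, 6])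

def Spec_solve (n : Int) (cross : List Int) (left : List Int) (right : List Int) (out : Int × Int) : Prop := out = solve_alt n cross left right
instance (n : Int) (cross : List Int) (left : List Int) (right : List Int) (out : Int × Int) : Decidable (Spec_solve n cross left right out) := by unfold Spec_solve; infer_instance

-- ===== CLAIM (what is proved, stated in full; the proofs are below) =====
def Claim_equal_solve : Prop := ∀ (n : Int) (cross : List Int) (left : List Int) (right : List Int), Dom_solve n cross left right → Pre_solve n cross left right → Spec_solve n cross left right (solve n cross left right)

-- ===== LEMMAS AND PROOFS =====

-- indexing/assignment into a '0 :: table of f' shaped list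
theorem pyGetD_cons_map_range (f : Nat → Int) (N j : Nat) (hj : j < N) :
    PySem.List.pyGetD (0 :: (List.range N).map f) ((j : Int) + 1) 0 = f j := by
  have h : ((j : Int) + 1) = ((j + 1 : Nat) : Int) := by push_cast; ring
  rw [h, PySem.List.pyGetD_natCast]
  simp [List.getD, hj]

theorem set_cons_map_range (f g : Nat → Int) (N j : Nat) (v : Int) (hj : j < N)
    (hfg : ∀ k, k < N → k ≠ j → f k = g k) (hv : v = g j) :
    (0 :: (List.range N).map f).set (j + 1) v = 0 :: (List.range N).map g := by
  apply List.ext_getElem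
  · simp
  · intro i h1 h2
    simp only [List.length_set, List.length_cons, List.length_map, List.length_range] at h1
    rcases eq_or_ne i (j + 1) with rfl | hne
    · rw [List.getElem_set_self (by simpa using h1)]
      simp [hv, List.getElem_map, List.getElem_range]
    · rw [List.getElem_set_ne (by omega)]
      cases i with
      | zero => simp
      | succ i =>
        simp only [List.getElem_cons_succ, List.getElem_map, List.getElem_range]
        exact hfg i (by omega) (by omega)

-- closed forms of A's two arrays, and the loop stages reaching them
def lcSpec (n : Int) (left : List Int) : List Int :=
  0 :: (List.range n.toNat).map (fun (k : Nat) => (left.take k).sum)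

def rcSpec (n : Int) (right : List Int) : List Int :=
  0 :: (List.range (n + 1).toNat).map
    (fun (k : Nat) => ((right.take (n - 1).toNat).drop k).sum)

def stageL (n : Int) (left : List Int) (a : Int) : List Int :=
  0 :: (List.range n.toNat).map (fun (k : Nat) => if (k : Int) + 1 < a then (left.take k).sum else 0)

def stageR (n : Int) (right : List Int) (a : Int) : List Int :=
  0 :: (List.range (n + 1).toNat).map
    (fun (k : Nat) => if a ≤ (k : Int) then ((right.take (n - 1).toNat).drop k).sum else 0)

theorem stageL_step (n : Int) (left : List Int) (a : Int) (hn : 1 ≤ n)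
    (hl : n - 1 ≤ (left.length : Int)) (h2 : 2 ≤ a) (han : a ≤ n) :
    PySem.List.pySetD (stageL n left a) a
      (PySem.List.pyGetD (stageL n left a) (a - 1) 0 + PySem.List.pyGetD left (a - 2) 0)
      = stageL n left (a + 1) := by
  have hjlt : (a - 1).toNat < n.toNat := by omega
  rw [PySem.List.pySetD_of_nonneg _ _ (by omega : (0:Int) ≤ a)]
  have hat : a.toNat = (a - 1).toNat + 1 := by omega
  rw [hat]
  apply set_cons_map_range _ _ _ _ _ hjlt
  · intro k hk hkne
    have : ((k : Int) + 1 < a) ↔ ((k : Int) + 1 < a + 1) := by omega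
    simp only [this]
  · have hread : PySem.List.pyGetD (stageL n left a) (a - 1) 0 =
        (left.take ((a - 2).toNat)).sum := by
      have h1 : (a - 1) = (((a - 2).toNat : Nat) : Int) + 1 := by omega
      rw [h1, stageL, pyGetD_cons_map_range _ _ _ (by omega)]
      simp only [if_pos (by omega : ((a-2).toNat : Int) + 1 < a)]
    have hidx : PySem.List.pyGetD left (a - 2) 0 = left[(a - 2).toNat]'(by omega) := by
      exact PySem.List.pyGetD_eq_getElem left (i := a - 2) 0 (by omega) (by omega)
    rw [hread, hidx]
    have hsucc : (a - 1).toNat = (a - 2).toNat + 1 := by omega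
    rw [if_pos (by push_cast; omega : (((a-1).toNat : Nat) : Int) + 1 < a + 1), hsucc]
    rw [List.sum_take_succ _ _ (by omega : (a-2).toNat < left.length)]

theorem lc_aux (n : Int) (left : List Int) (hn : 1 ≤ n) (hl : n - 1 ≤ (left.length : Int)) :
    ∀ (d : Nat) (a : Int), 2 ≤ a → a ≤ n + 1 → n + 1 - a = (d : Int) →
    (PySem.List.pyRange a (n + 1) 1).foldl
      (fun lc i => PySem.List.pySetD lc i
        (PySem.List.pyGetD lc (i - 1) 0 + PySem.List.pyGetD left (i - 2) 0))
      (stageL n left a) = stageL n left (n + 1) := by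
  intro d
  induction d with
  | zero =>
    intro a h2 hle hd
    have : a = n + 1 := by omega
    subst this
    rw [PySem.List.pyRange_one_eq_nil (by omega)]
    rfl
  | succ d ih =>
    intro a h2 hle hd
    have hlt : a < n + 1 := by omega
    rw [PySem.List.pyRange_one_cons hlt]
    simp only [List.foldl_cons]
    rw [stageL_step n left a hn hl h2 (by omega)]
    exact ih (a + 1) (by omega) (by omega) (by omega)

theorem replicate_eq_stageL (n : Int) (left : List Int) (hn : 1 ≤ n) :
    List.replicate (n + 1).toNat 0 = stageL n left 2 := by
  apply List.ext_getElem
  · simp [stageL]; omega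
  · intro i h1 h2
    simp only [List.getElem_replicate]
    cases i with
    | zero => rfl
    | succ i =>
      simp only [stageL, List.getElem_cons_succ, List.getElem_map, List.getElem_range]
      split
      · next h =>
        have : i = 0 := by omega
        subst this; simp
      · rfl

theorem stageL_final (n : Int) (left : List Int) : stageL n left (n + 1) = lcSpec n left := by
  simp only [stageL, lcSpec, List.cons.injEq, true_and]
  apply List.map_congr_left
  intro k hk
  rw [List.mem_range] at hk
  rw [if_pos (by omega : (k : Int) + 1 < n + 1)]

theorem buildLeftCum_eq (n : Int) (left : List Int) (hn : 1 ≤ n)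
    (hl : n - 1 ≤ (left.length : Int)) : buildLeftCum n left = lcSpec n left := by
  rw [buildLeftCum, replicate_eq_stageL n left hn,
    lc_aux n left hn hl (n - 1).toNat 2 (by omega) (by omega) (by omega), stageL_final]

theorem stageR_step (n : Int) (right : List Int) (a : Int) (hn : 1 ≤ n)
    (hr : n - 1 ≤ (right.length : Int)) (h1 : 1 ≤ a) (han : a ≤ n - 1) :
    PySem.List.pySetD (stageR n right a) a
      (PySem.List.pyGetD (stageR n right a) (a + 1) 0 + PySem.List.pyGetD right (a - 1) 0)
      = stageR n right (a - 1) := by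
  have hlen : (right.take (n - 1).toNat).length = (n - 1).toNat := by
    simp; omega
  rw [PySem.List.pySetD_of_nonneg _ _ (by omega : (0:Int) ≤ a)]
  have hat : a.toNat = (a - 1).toNat + 1 := by omega
  rw [hat]
  apply set_cons_map_range _ _ _ _ _ (by omega : (a - 1).toNat < (n + 1).toNat)
  · intro k hk hkne
    have : (a ≤ (k : Int)) ↔ (a - 1 ≤ (k : Int)) := by omega
    simp only [this]
  · have hread : PySem.List.pyGetD (stageR n right a) (a + 1) 0 =
        ((right.take (n - 1).toNat).drop a.toNat).sum := by
      have h1' : (a + 1) = ((a.toNat : Nat) : Int) + 1 := by omega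
      rw [h1', stageR, pyGetD_cons_map_range _ _ _ (by omega)]
      rw [if_pos (by omega : a ≤ ((a.toNat : Nat) : Int))]
    have hidx : PySem.List.pyGetD right (a - 1) 0 = right[(a - 1).toNat]'(by omega) := by
      exact PySem.List.pyGetD_eq_getElem right (i := a - 1) 0 (by omega) (by omega)
    rw [hread, hidx, if_pos (by omega : a - 1 ≤ (((a - 1).toNat : Nat) : Int))]
    have hdrop : (right.take (n - 1).toNat).drop (a - 1).toNat =
        right[(a - 1).toNat]'(by omega) :: (right.take (n - 1).toNat).drop a.toNat := by
      rw [List.drop_eq_getElem_cons (by omega : (a - 1).toNat < (right.take (n - 1).toNat).length)]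
      congr 1
      · rw [List.getElem_take]
      · congr 1; omega
    rw [hdrop, List.sum_cons]
    ring

theorem rc_aux (n : Int) (right : List Int) (hn : 1 ≤ n) (hr : n - 1 ≤ (right.length : Int)) :
    ∀ (d : Nat) (a : Int), 0 ≤ a → a ≤ n - 1 → a = (d : Int) →
    (PySem.List.pyRange a 0 (-1)).foldl
      (fun rc i => PySem.List.pySetD rc i
        (PySem.List.pyGetD rc (i + 1) 0 + PySem.List.pyGetD right (i - 1) 0))
      (stageR n right a) = stageR n right 0 := by
  intro d
  induction d with
  | zero =>
    intro a h0 hle hd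
    have : a = 0 := by omega
    subst this
    rw [PySem.List.pyRange_neg_one_eq_nil (by omega)]
    rfl
  | succ d ih =>
    intro a h0 hle hd
    rw [PySem.List.pyRange_neg_one_cons (by omega : (0:Int) < a)]
    simp only [List.foldl_cons]
    rw [stageR_step n right a hn hr (by omega) (by omega)]
    exact ih (a - 1) (by omega) (by omega) (by omega)

theorem stageR_final (n : Int) (right : List Int) : stageR n right 0 = rcSpec n right := by
  simp only [stageR, rcSpec, List.cons.injEq, true_and]
  apply List.map_congr_left
  intro k hk
  rw [if_pos (by omega : (0:Int) ≤ (k : Int))]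

theorem replicate_eq_stageR (n : Int) (right : List Int) (hn : 1 ≤ n)
    (hr : n - 1 ≤ (right.length : Int)) :
    List.replicate (n + 2).toNat 0 = stageR n right (n - 1) := by
  have hlen : (right.take (n - 1).toNat).length = (n - 1).toNat := by simp; omega
  apply List.ext_getElem
  · simp [stageR]; omega
  · intro i h1 h2
    simp only [List.getElem_replicate]
    cases i with
    | zero => rfl
    | succ i =>
      simp only [stageR, List.getElem_cons_succ, List.getElem_map, List.getElem_range]
      split
      · next h =>
        rw [List.drop_eq_nil_of_le (by omega), List.sum_nil]
      · rfl

theorem buildRightCum_eq (n : Int) (right : List Int) (hn : 1 ≤ n)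
    (hr : n - 1 ≤ (right.length : Int)) : buildRightCum n right = rcSpec n right := by
  rw [buildRightCum, replicate_eq_stageR n right hn hr,
    rc_aux n right hn hr (n - 1).toNat (n - 1) (by omega) (by omega) (by omega), stageR_final]

-- the two selection loops agree: B's running accumulators equal A's array reads
theorem sel_aux (n : Int) (cross left right : List Int) (hn : 1 ≤ n)
    (hl : n - 1 ≤ (left.length : Int)) (hr : n - 1 ≤ (right.length : Int)) :
    ∀ (d : Nat) (a : Int), 2 ≤ a → a ≤ n + 1 → n + 1 - a = (d : Int) → ∀ (bi bd : Int),
    (PySem.List.pyRange a (n + 1) 1).foldl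
      (fun s i =>
        let la := s.2.2.1 + PySem.List.pyGetD left (i - 2) 0
        let rp := s.2.2.2 + PySem.List.pyGetD right (i - 2) 0
        let dist := la + PySem.List.pyGetD cross (i - 1) 0 + ((right.take (n - 1).toNat).sum - rp)
        if dist < s.2.1 then (i, dist, la, rp) else (s.1, s.2.1, la, rp))
      (bi, bd, (left.take (a - 2).toNat).sum, (right.take (a - 2).toNat).sum)
    =
    (((PySem.List.pyRange a (n + 1) 1).foldl
      (fun b i =>
        let dist := PySem.List.pyGetD (lcSpec n left) i 0 + PySem.List.pyGetD cross (i - 1) 0 +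
          PySem.List.pyGetD (rcSpec n right) i 0
        if dist < b.2 then (i, dist) else b) (bi, bd)).1,
     ((PySem.List.pyRange a (n + 1) 1).foldl
      (fun b i =>
        let dist := PySem.List.pyGetD (lcSpec n left) i 0 + PySem.List.pyGetD cross (i - 1) 0 +
          PySem.List.pyGetD (rcSpec n right) i 0
        if dist < b.2 then (i, dist) else b) (bi, bd)).2,
     (left.take (n - 1).toNat).sum, (right.take (n - 1).toNat).sum) := by
  intro d
  induction d with
  | zero =>
    intro a h2 hle hd bi bd
    have ha : a = n + 1 := by omega
    subst ha
    rw [PySem.List.pyRange_one_eq_nil (le_refl _)]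
    simp only [List.foldl_nil]
    have h1 : n + 1 - 2 = n - 1 := by ring
    rw [h1]
  | succ d ih =>
    intro a h2 hle hd bi bd
    rw [PySem.List.pyRange_one_cons (by omega : a < n + 1)]
    simp only [List.foldl_cons]
    have hla : (left.take (a - 2).toNat).sum + PySem.List.pyGetD left (a - 2) 0
        = (left.take (a - 1).toNat).sum := by
      rw [PySem.List.pyGetD_eq_getElem left (i := a - 2) 0 (by omega) (by omega)]
      have h1 : (a - 1).toNat = (a - 2).toNat + 1 := by omega
      rw [h1, List.sum_take_succ _ _ (by omega : (a - 2).toNat < left.length)]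
    have hrp : (right.take (a - 2).toNat).sum + PySem.List.pyGetD right (a - 2) 0
        = (right.take (a - 1).toNat).sum := by
      rw [PySem.List.pyGetD_eq_getElem right (i := a - 2) 0 (by omega) (by omega)]
      have h1 : (a - 1).toNat = (a - 2).toNat + 1 := by omega
      rw [h1, List.sum_take_succ _ _ (by omega : (a - 2).toNat < right.length)]
    have hLC : PySem.List.pyGetD (lcSpec n left) a 0 = (left.take (a - 1).toNat).sum := by
      have h1 : a = (((a - 1).toNat : Nat) : Int) + 1 := by omega
      conv_lhs => rw [h1]
      rw [lcSpec, pyGetD_cons_map_range _ _ _ (by omega : (a - 1).toNat < n.toNat)]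
    have hRC : PySem.List.pyGetD (rcSpec n right) a 0
        = ((right.take (n - 1).toNat).drop (a - 1).toNat).sum := by
      have h1 : a = (((a - 1).toNat : Nat) : Int) + 1 := by omega
      conv_lhs => rw [h1]
      rw [rcSpec, pyGetD_cons_map_range _ _ _ (by omega : (a - 1).toNat < (n + 1).toNat)]
    have hsplit : (right.take (n - 1).toNat).sum - (right.take (a - 1).toNat).sum
        = ((right.take (n - 1).toNat).drop (a - 1).toNat).sum := by
      have htt : (right.take (n - 1).toNat).take (a - 1).toNat = right.take (a - 1).toNat := by
        rw [List.take_take]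
        congr 1
        omega
      conv_lhs => rw [← List.take_append_drop (a - 1).toNat (right.take (n - 1).toNat)]
      rw [List.sum_append, htt]
      ring
    have hdist : (left.take (a - 1).toNat).sum + PySem.List.pyGetD cross (a - 1) 0 +
        ((right.take (n - 1).toNat).sum - (right.take (a - 1).toNat).sum)
        = PySem.List.pyGetD (lcSpec n left) a 0 + PySem.List.pyGetD cross (a - 1) 0 +
          PySem.List.pyGetD (rcSpec n right) a 0 := by
      rw [hLC, hRC, hsplit]
    simp only [hla, hrp, hdist]
    have h21 : a + 1 - 2 = a - 1 := by ring
    by_cases hc : PySem.List.pyGetD (lcSpec n left) a 0 + PySem.List.pyGetD cross (a - 1) 0 +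
        PySem.List.pyGetD (rcSpec n right) a 0 < bd
    · rw [if_pos hc, if_pos hc]
      have := ih (a + 1) (by omega) (by omega) (by omega) a
        (PySem.List.pyGetD (lcSpec n left) a 0 + PySem.List.pyGetD cross (a - 1) 0 +
          PySem.List.pyGetD (rcSpec n right) a 0)
      rw [h21] at this
      exact this
    · rw [if_neg hc, if_neg hc]
      have := ih (a + 1) (by omega) (by omega) (by omega) bi bd
      rw [h21] at this
      exact this

theorem solve_eq (n : Int) (cross left right : List Int) (hn : 1 ≤ n)
    (hcr : n ≤ (cross.length : Int)) (hl : n - 1 ≤ (left.length : Int))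
    (hr : n - 1 ≤ (right.length : Int)) :
    solve n cross left right = solve_alt n cross left right := by
  have hT := PySem.List.slice_to right (by omega : (0:Int) ≤ n - 1)
  simp only [solve, solve_alt, hT,
    buildLeftCum_eq n left hn hl, buildRightCum_eq n right hn hr]
  have h1LC : PySem.List.pyGetD (lcSpec n left) 1 0 = 0 := by
    have h1 : (1 : Int) = ((0 : Nat) : Int) + 1 := by norm_num
    rw [h1, lcSpec, pyGetD_cons_map_range _ _ _ (by omega : 0 < n.toNat)]
    simp
  have h1RC : PySem.List.pyGetD (rcSpec n right) 1 0 = (right.take (n - 1).toNat).sum := by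
    have h1 : (1 : Int) = ((0 : Nat) : Int) + 1 := by norm_num
    rw [h1, rcSpec, pyGetD_cons_map_range _ _ _ (by omega : 0 < (n + 1).toNat)]
    simp
  rw [h1LC, h1RC, zero_add]
  have key := sel_aux n cross left right hn hl hr (n - 1).toNat 2 (by omega) (by omega)
    (by omega) 1 (PySem.List.pyGetD cross 0 0 + (right.take (n - 1).toNat).sum)
  have h0 : ((2 : Int) - 2).toNat = 0 := rfl
  rw [h0, List.take_zero, List.take_zero, List.sum_nil] at key
  rw [key]

-- ===== VERDICT (by name: the statement is the Claim_ definition above) =====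
theorem solve_spec : Claim_equal_solve := by
  intro n cross left right _ hpre
  obtain ⟨hn, hcr, hl, hr⟩ := hpre
  exact solve_eq n cross left right hn hcr hl hr
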